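-- pv_equiv track=rewrite | github.com/otiasiruy/cp | leetcode/3523.py | maximumPossibleSize
-- ===== SOURCE A (Python) =====
-- from typing import List
--
-- def maximumPossibleSize(nums: List[int]) -> int:
--     ans = []
--     n = len(nums)
--     min_v = nums[0]
--     for i in range(n):
--         if nums[i] >= min_v:
--             ans.append(nums[i])
--             if nums[i] > min_v:
--                 min_v = nums[i]
--     return len(ans)
-- ===== SOURCE B (Python) =====
-- from typing import List
--
-- def maximumPossibleSize(nums: List[int]) -> int:
--     # An element is kept by the greedy scan iff it equals the maximum of its prefix.
--     return sum(1 for i in range(len(nums)) if nums[i] == max(nums[: i + 1]))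
-- ===== Notes on version B (the rewrite author's own statement) =====
-- stated objective: simpler
-- what changed: Replaces A's stateful scan (running max + appended kept-list) with a declarative one-line count of positions whose element equals the maximum of its prefix.
import Mathlib
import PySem

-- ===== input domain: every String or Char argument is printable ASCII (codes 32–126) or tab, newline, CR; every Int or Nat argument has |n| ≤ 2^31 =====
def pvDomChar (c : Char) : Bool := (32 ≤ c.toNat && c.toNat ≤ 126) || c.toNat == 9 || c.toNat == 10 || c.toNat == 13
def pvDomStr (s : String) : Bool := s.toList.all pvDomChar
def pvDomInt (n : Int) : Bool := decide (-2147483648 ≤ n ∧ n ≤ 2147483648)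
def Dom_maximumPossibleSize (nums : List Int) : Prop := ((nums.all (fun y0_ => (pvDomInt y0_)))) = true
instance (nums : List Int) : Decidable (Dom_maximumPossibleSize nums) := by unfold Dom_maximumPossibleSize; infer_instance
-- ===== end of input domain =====

-- B replaces A's stateful greedy scan by a count of positions equal to their prefix maximum (simpler, one line); A raises on [] (excluded by Pre_, B returns 0 there).


-- ===== PORT A =====
-- literal port of A: min_v := nums[0] (raise on []), then a fold over range(n) carrying (ans, min_v).
def maximumPossibleSize (nums : List Int) : Int :=
  match PySem.List.pyGet? nums 0 with
  | none => 0  -- Python raises IndexError here; excluded by Pre_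
  | some m0 =>
    let st := (PySem.List.pyRange 0 (nums.length : Int) 1).foldl
      (fun (st : List Int × Int) i =>
        if st.2 ≤ PySem.List.pyGetD nums i 0 then
          (st.1 ++ [PySem.List.pyGetD nums i 0],
            if st.2 < PySem.List.pyGetD nums i 0 then PySem.List.pyGetD nums i 0 else st.2)
        else st)
      (([] : List Int), m0)
    (st.1.length : Int)

-- ===== PORT B =====
-- literal port of Source B: sum(1 for i in range(len(nums)) if nums[i] == max(nums[:i+1]))
def maximumPossibleSize_alt (nums : List Int) : Int :=
  (PySem.List.pyRange 0 (nums.length : Int) 1).foldl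
    (fun acc i =>
      if some (PySem.List.pyGetD nums i 0)
          = PySem.List.max? (PySem.List.slice nums none (some (i + 1))) (fun y => y)
      then acc + 1 else acc)
    0

-- ===== PRECONDITION & SPEC =====
-- Pre_ excludes only the empty list, on which A raises IndexError.
def Pre_maximumPossibleSize (nums : List Int) : Prop := nums ≠ []
instance (nums : List Int) : Decidable (Pre_maximumPossibleSize nums) := by unfold Pre_maximumPossibleSize; infer_instance
def pvWitness_maximumPossibleSize : List Int := [3, 1, 4, 4, 2, 5]

def Spec_maximumPossibleSize (nums : List Int) (out : Int) : Prop := out = maximumPossibleSize_alt nums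
instance (nums : List Int) (out : Int) : Decidable (Spec_maximumPossibleSize nums out) := by unfold Spec_maximumPossibleSize; infer_instance

-- ===== CLAIM (what is proved, stated in full; the proofs are below) =====
def Claim_equal_maximumPossibleSize : Prop := ∀ (nums : List Int), Dom_maximumPossibleSize nums → Pre_maximumPossibleSize nums → Spec_maximumPossibleSize nums (maximumPossibleSize nums)

-- ===== LEMMAS AND PROOFS =====

-- reference count: number of elements ≥ the running max started at m
def pvCnt (m : Int) : List Int → Nat
  | [] => 0
  | x :: t => (if m ≤ x then 1 else 0) + pvCnt (max m x) t

theorem pvCnt_snoc (l : List Int) (z : Int) : ∀ m,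
    pvCnt m (l ++ [z]) = pvCnt m l + (if l.foldl max m ≤ z then 1 else 0) := by
  induction l with
  | nil => intro m; simp [pvCnt]
  | cons x t ih =>
      intro m
      simp only [List.cons_append, pvCnt, List.foldl_cons, ih (max m x), Nat.add_assoc]
      rfl

theorem A_fold (l : List Int) : ∀ (a : List Int) (m : Int),
    ((l.foldl
      (fun (st : List Int × Int) x =>
        if st.2 ≤ x then (st.1 ++ [x], if st.2 < x then x else st.2) else st)
      (a, m)).1).length = a.length + pvCnt m l := by
  induction l with
  | nil => intro a m; simp [pvCnt]
  | cons x t ih =>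
      intro a m
      simp only [List.foldl_cons, pvCnt]
      by_cases h : m ≤ x
      · have hx : (if m < x then x else m) = max m x := by
          by_cases h2 : m < x <;> simp [h2] <;> omega
        simp [h, hx, ih]
        omega
      · have hx : max m x = m := by omega
        simp [h, hx, ih]

-- B's per-index test, for index k < nums.length, is nums[k] = max of the prefix ending at k
theorem B_test (nums : List Int) (k : Nat) (_hk : k < nums.length) :
    (some (PySem.List.pyGetD nums (k : Int) 0)
      = PySem.List.max? (PySem.List.slice nums none (some ((k : Int) + 1))) (fun y => y))
    ↔ some (nums.getD k 0) = PySem.List.max? (nums.take (k + 1)) (fun y => y) := by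
  have h1 : ((k : Int) + 1) = ((k + 1 : Nat) : Int) := by push_cast; ring
  rw [h1, PySem.List.slice_to_natCast]
  simp [PySem.List.pyGetD_natCast]

def pvPcnt : List Int → Nat
  | [] => 0
  | h :: t => pvCnt h (h :: t)

theorem B_range (nums : List Int) : ∀ (j : Nat), j ≤ nums.length →
    ((List.range j).countP
      (fun k => decide (some (nums.getD k 0) = PySem.List.max? (nums.take (k + 1)) (fun y => y))))
    = pvPcnt (nums.take j) := by
  intro j hj
  induction j with
  | zero => simp [pvPcnt]
  | succ j ih =>
      have hj' : j ≤ nums.length := by omega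
      have hjlt : j < nums.length := by omega
      have hz : nums.getD j 0 = nums[j] := by
        simp [List.getD, List.getElem?_eq_getElem hjlt]
      have htake : nums.take (j + 1) = nums.take j ++ [nums[j]] := by
        rw [List.take_add_one]
        simp [hjlt]
      rw [List.range_succ, List.countP_append, ih hj']
      cases hcase : nums.take j with
      | nil =>
          have hj0 : j = 0 := by
            by_contra hne
            have : (nums.take j).length = j := List.length_take_of_le hj'
            simp [hcase] at this; omega
          subst hj0
          simp [htake, hcase, pvPcnt, pvCnt, PySem.List.max?_id_cons,
            List.getElem?_eq_getElem hjlt]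
      | cons h t =>
          rw [htake, hcase]
          have hmax : PySem.List.max? ((h :: t) ++ [nums[j]]) (fun y => y)
              = some ((t ++ [nums[j]]).foldl max h) := by
            rw [List.cons_append, PySem.List.max?_id_cons]
          have hfold : (t ++ [nums[j]]).foldl max h = max (t.foldl max h) nums[j] := by
            simp [List.foldl_append]
          have hcond : (some nums[j] = PySem.List.max? ((h :: t) ++ [nums[j]]) (fun y => y))
              ↔ (t.foldl max h ≤ nums[j]) := by
            rw [hmax, hfold]
            constructor
            · intro he
              have := Option.some.injEq _ _ ▸ he
              simp at this
              omega
            · intro hle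
              have : max (t.foldl max h) nums[j] = nums[j] := by omega
              rw [this]
          have hsnoc : pvCnt h ((h :: t) ++ [nums[j]])
              = pvCnt h (h :: t) + (if (h :: t).foldl max h ≤ nums[j] then 1 else 0) :=
            pvCnt_snoc (h :: t) nums[j] h
          have hfh : (h :: t).foldl max h = t.foldl max h := by simp
          rw [show pvPcnt (h :: t ++ [nums[j]]) = pvCnt h (h :: t ++ [nums[j]]) from rfl,
              show pvPcnt (h :: t) = pvCnt h (h :: t) from rfl, hsnoc, hfh]
          have hcnd : (some (nums.getD j 0)
              = PySem.List.max? (nums.take (j + 1)) (fun y => y))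
              ↔ (t.foldl max h ≤ nums[j]) := by
            rw [htake, hcase, hz]; exact hcond
          simp only [List.countP_singleton, hcnd]
          by_cases hle : t.foldl max h ≤ nums[j] <;> simp [hle]

-- ===== VERDICT (by name: the statement is the Claim_ definition above) =====
theorem maximumPossibleSize_spec : Claim_equal_maximumPossibleSize := by
  intro nums _ hpre
  unfold Spec_maximumPossibleSize maximumPossibleSize maximumPossibleSize_alt
  cases nums with
  | nil => exact absurd rfl hpre
  | cons h t =>
      have h0 : PySem.List.pyGet? (h :: t) 0 = some h := by
        simp [PySem.List.pyGet?, PySem.List.pyIdx?]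
      simp only [h0]
      -- A side: fold over pyRange of pyGetD = fold over the list
      rw [PySem.List.foldl_pyRange_zero_pyGetD' (h :: t) 0
        (fun (st : List Int × Int) x =>
          if st.2 ≤ x then (st.1 ++ [x], if st.2 < x then x else st.2) else st)
        (([] : List Int), h)]
      -- B side: index the range, reduce to countP over List.range
      rw [PySem.List.pyRange_zero_nat, List.foldl_map]
      rw [PySem.List.foldl_congr_mem (List.range (h :: t).length) _
            (fun (acc : Int) (k : Nat) =>
              if some ((h :: t).getD k 0) = PySem.List.max? ((h :: t).take (k + 1)) (fun y => y)
              then acc + 1 else acc) 0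
            (by intro acc x hx
                have hklt : x < (h :: t).length := List.mem_range.mp hx
                exact if_congr (B_test (h :: t) x hklt) rfl rfl ▸ rfl)]
      rw [PySem.List.foldl_ite_add_one]
      rw [B_range (h :: t) (h :: t).length (le_refl _)]
      simp only [List.take_length, pvPcnt]
      have := A_fold (h :: t) [] h
      rw [this]
      simp [pvCnt]
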